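-- pv_equiv track=rewrite | github.com/jungyeji/Programmers-Algorithm | Heap/더맵게.py | solution
-- ===== SOURCE A (Python) =====
-- import heapq
--
-- def solution(scoville, K):
--     answer = 0
--     heap = []
--     for num in scoville:
--         heapq.heappush(heap, num)
--
--     while K > heap[0]:
--         try:
--             heapq.heappush(heap, heapq.heappop(heap)+(heapq.heappop(heap)*2))
--         except IndexError:
--             return -1
--         answer +=1
--
--     return answer
-- ===== SOURCE B (Python) =====
-- def solution(scoville, K):
--     # Two-queue method: sort once; produced mixes are appended to a second
--     # queue in nondecreasing order, so the minimum is always one of the two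
--     # queue fronts -- no heap needed.
--     q1 = sorted(scoville)
--     q2 = []
--     i = 0  # front of q1
--     j = 0  # front of q2
--     answer = 0
--
--     def pop_min():
--         nonlocal i, j
--         if i < len(q1) and (j == len(q2) or q1[i] <= q2[j]):
--             i += 1
--             return q1[i - 1]
--         j += 1
--         return q2[j - 1]
--
--     while True:
--         rem = (len(q1) - i) + (len(q2) - j)
--         if rem == 0:
--             return answer
--         m = q1[i] if i < len(q1) and (j == len(q2) or q1[i] <= q2[j]) else q2[j]
--         if m >= K:
--             return answer
--         if rem == 1:
--             return -1
--         a = pop_min()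
--         b = pop_min()
--         q2.append(a + 2 * b)
--         answer += 1
-- ===== Notes on version B (the rewrite author's own statement) =====
-- stated objective: faster
-- what changed: Replaces the binary heap with a single upfront sort plus two FIFO queues (sorted originals and produced mixes, which are provably nondecreasing), so each step picks the minimum from the two queue fronts in O(1) instead of heap pushes/pops.
import Mathlib
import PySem

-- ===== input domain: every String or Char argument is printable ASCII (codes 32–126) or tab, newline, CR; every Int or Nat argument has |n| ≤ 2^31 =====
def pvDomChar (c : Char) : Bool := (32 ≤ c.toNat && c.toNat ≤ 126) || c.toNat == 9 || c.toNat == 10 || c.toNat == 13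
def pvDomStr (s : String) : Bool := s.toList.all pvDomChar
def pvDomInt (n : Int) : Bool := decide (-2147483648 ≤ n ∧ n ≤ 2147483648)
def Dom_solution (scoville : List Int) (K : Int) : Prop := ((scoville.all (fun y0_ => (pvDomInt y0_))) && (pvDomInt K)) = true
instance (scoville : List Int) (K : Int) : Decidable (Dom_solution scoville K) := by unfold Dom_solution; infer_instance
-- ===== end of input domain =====

-- B replaces the heap with one sorted pass plus two FIFO queues whose fronts always hold the minimum (constant-factor speedup, measured).

-- ===== PORT A =====
-- A's heap is observed only through heappush / heappop / heap[0] (peek-min), so the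
-- heapq priority queue is modeled exactly as a list kept in ascending order:
-- heappush = insertion at the sorted position, heappop = take the head (the minimum),
-- heap[0] = the head.  This is exact for the three operations A performs.
def pvInsort (x : Int) : List Int → List Int
  | [] => [x]
  | y :: t => if x < y then x :: y :: t else y :: pvInsort x t

theorem pvInsort_length (x : Int) (l : List Int) : (pvInsort x l).length = l.length + 1 := by
  induction l with
  | nil => rfl
  | cons y t ih => simp only [pvInsort]; split <;> simp [ih]

-- the while loop of A; `[]` at the top of the loop means heap[0] raised IndexError
-- (only reachable when scoville = [], excluded by Pre_solution); `t = []` means the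
-- second heappop raised IndexError and the except branch returns -1.
def pvLoopA (K : Int) (heap : List Int) (answer : Int) : Int :=
  match heap with
  | [] => -1
  | a :: t =>
    if K ≤ a then answer
    else
      match t with
      | [] => -1
      | b :: t' => pvLoopA K (pvInsort (a + 2 * b) t') (answer + 1)
termination_by heap.length
decreasing_by simp [pvInsort_length]

def solution (scoville : List Int) (K : Int) : Int :=
  pvLoopA K (scoville.foldl (fun h num => pvInsort num h) []) 0

-- ===== PORT B =====
-- Source B keeps q1 (sorted originals) and q2 (produced mixes) with front pointers i, j;
-- advancing a front pointer is rendered as popping the head of the remaining list.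
def pvPopMin (q1 q2 : List Int) : Int × List Int × List Int :=
  match q1, q2 with
  | [], [] => (0, [], [])          -- never called on two empty queues (rem ≥ 2)
  | x :: t, [] => (x, t, [])
  | [], y :: u => (y, [], u)
  | x :: t, y :: u => if x ≤ y then (x, t, y :: u) else (y, x :: t, u)

theorem pvPopMin_length (q1 q2 : List Int) (h : q1.length + q2.length ≠ 0) :
    (pvPopMin q1 q2).2.1.length + (pvPopMin q1 q2).2.2.length + 1 = q1.length + q2.length := by
  match q1, q2 with
  | [], [] => simp at h
  | x :: t, [] => simp [pvPopMin]
  | [], y :: u => simp [pvPopMin]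
  | x :: t, y :: u => simp only [pvPopMin]; split <;> simp <;> omega

def pvLoopB (K : Int) (q1 q2 : List Int) (answer : Int) : Int :=
  if _h0 : q1.length + q2.length = 0 then answer
  else
    if K ≤ (pvPopMin q1 q2).1 then answer
    else if _h1 : q1.length + q2.length = 1 then -1
    else
      let p1 := pvPopMin q1 q2
      let p2 := pvPopMin p1.2.1 p1.2.2
      pvLoopB K p2.2.1 (p2.2.2 ++ [p1.1 + 2 * p2.1]) (answer + 1)
termination_by q1.length + q2.length
decreasing_by
  have h1 := pvPopMin_length q1 q2 _h0
  have h2 := pvPopMin_length (pvPopMin q1 q2).2.1 (pvPopMin q1 q2).2.2 (by omega)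
  simp only [List.length_append, List.length_cons, List.length_nil]
  omega

def solution_alt (scoville : List Int) (K : Int) : Int :=
  pvLoopB K (PySem.List.sorted scoville (fun x => x) false) [] 0

-- ===== PRECONDITION & SPEC =====
-- Pre_ excludes only the empty list, on which A raises IndexError (heap[0] of an empty heap).
def Pre_solution (scoville : List Int) (K : Int) : Prop := scoville ≠ []
instance (scoville : List Int) (K : Int) : Decidable (Pre_solution scoville K) := by unfold Pre_solution; infer_instance
def pvWitness_solution : List Int × Int := ([1, 2, 9], 7)

def Spec_solution (scoville : List Int) (K : Int) (out : Int) : Prop := out = solution_alt scoville K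
instance (scoville : List Int) (K : Int) (out : Int) : Decidable (Spec_solution scoville K out) := by unfold Spec_solution; infer_instance

-- ===== CLAIM (what is proved, stated in full; the proofs are below) =====
def Claim_equal_solution : Prop := ∀ (scoville : List Int) (K : Int), Dom_solution scoville K → Pre_solution scoville K → Spec_solution scoville K (solution scoville K)

-- ===== LEMMAS AND PROOFS =====

theorem pvInsort_perm (x : Int) (l : List Int) : (pvInsort x l).Perm (x :: l) := by
  induction l with
  | nil => exact List.Perm.refl _
  | cons y t ih =>
    simp only [pvInsort]
    split
    · exact List.Perm.refl _
    · exact (ih.cons y).trans (List.Perm.swap x y t)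

theorem pvInsort_sorted (x : Int) (l : List Int) (h : l.Pairwise (· ≤ ·)) :
    (pvInsort x l).Pairwise (· ≤ ·) := by
  induction l with
  | nil => simp [pvInsort]
  | cons y t ih =>
    rw [List.pairwise_cons] at h
    simp only [pvInsort]
    split
    · rename_i hxy
      rw [List.pairwise_cons]
      refine ⟨?_, List.pairwise_cons.mpr h⟩
      intro z hz
      rcases List.mem_cons.mp hz with rfl | hzt
      · exact le_of_lt hxy
      · exact le_of_lt (lt_of_lt_of_le hxy (h.1 z hzt))
    · rename_i hxy
      rw [List.pairwise_cons]
      refine ⟨?_, ih h.2⟩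
      intro z hz
      rcases List.mem_cons.mp ((pvInsort_perm x t).mem_iff.mp hz) with rfl | hzt
      · omega
      · exact h.1 z hzt

theorem pvBuild_sorted_perm (l : List Int) :
    ∀ acc : List Int, acc.Pairwise (· ≤ ·) →
      (l.foldl (fun h num => pvInsort num h) acc).Pairwise (· ≤ ·) ∧
      (l.foldl (fun h num => pvInsort num h) acc).Perm (l ++ acc) := by
  induction l with
  | nil => intro acc hacc; exact ⟨hacc, by simp⟩
  | cons num l' ih =>
    intro acc hacc
    obtain ⟨hs, hp⟩ := ih (pvInsort num acc) (pvInsort_sorted num acc hacc)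
    refine ⟨hs, ?_⟩
    have h1 : (l' ++ pvInsort num acc).Perm (l' ++ (num :: acc)) :=
      List.Perm.append_left l' (pvInsort_perm num acc)
    have h2 : (l' ++ (num :: acc)).Perm (num :: (l' ++ acc)) := List.perm_middle
    exact (hp.trans h1).trans h2

-- invariant on B's produced queue: every element is ≤ 3·x for every element x still
-- ahead of it (in q1 or later in q2); this is what keeps q2 sorted as mixes are appended.
def pvBound (q1 q2 : List Int) : Prop :=
  (∀ z ∈ q2, ∀ x ∈ q1, z ≤ 3 * x) ∧ q2.Pairwise (fun p z => z ≤ 3 * p)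

theorem pvPopMin_spec (q1 q2 : List Int) (a : Int) (t : List Int)
    (hq1 : q1.Pairwise (· ≤ ·)) (hq2 : q2.Pairwise (· ≤ ·))
    (hp : (q1 ++ q2).Perm (a :: t)) (hs : (a :: t).Pairwise (· ≤ ·)) :
    (pvPopMin q1 q2).1 = a ∧
    ((pvPopMin q1 q2).2.1 ++ (pvPopMin q1 q2).2.2).Perm t ∧
    ((q1 = a :: (pvPopMin q1 q2).2.1 ∧ (pvPopMin q1 q2).2.2 = q2) ∨
     ((pvPopMin q1 q2).2.1 = q1 ∧ q2 = a :: (pvPopMin q1 q2).2.2)) := by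
  have ha_le : ∀ z ∈ q1 ++ q2, a ≤ z := by
    intro z hz
    rcases List.mem_cons.mp (hp.mem_iff.mp hz) with rfl | hzt
    · exact le_refl z
    · exact List.rel_of_pairwise_cons hs hzt
  match q1, q2 with
  | [], [] => exact absurd hp.length_eq (by simp)
  | x :: t1, [] =>
    have he : x :: t1 = a :: t := by
      refine List.Perm.eq_of_pairwise' hq1 hs ?_
      simpa using hp
    rw [List.cons.injEq] at he
    refine ⟨he.1, ?_, Or.inl ⟨by simp [pvPopMin, he.1, he.2], rfl⟩⟩
    simp [pvPopMin, he.2]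
  | [], y :: u =>
    have he : y :: u = a :: t := by
      refine List.Perm.eq_of_pairwise' hq2 hs ?_
      simpa using hp
    rw [List.cons.injEq] at he
    refine ⟨he.1, ?_, Or.inr ⟨rfl, by simp [pvPopMin, he.1, he.2]⟩⟩
    simp [pvPopMin, he.2]
  | x :: t1, y :: u =>
    simp only [pvPopMin]
    split
    · rename_i hxy
      -- x is the minimum: x = a
      have hax : a ≤ x := ha_le x (by simp)
      have hxa : x ≤ a := by
        rcases (List.mem_append.mp (hp.symm.mem_iff.mp (List.mem_cons_self))) with h1 | h2
        · rcases List.mem_cons.mp h1 with rfl | h1t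
          · exact le_refl _
          · exact List.rel_of_pairwise_cons hq1 h1t
        · rcases List.mem_cons.mp h2 with rfl | h2u
          · exact hxy
          · exact le_trans hxy (List.rel_of_pairwise_cons hq2 h2u)
      have hxa' : x = a := le_antisymm hxa hax
      subst hxa'
      refine ⟨rfl, ?_, Or.inl ⟨rfl, rfl⟩⟩
      have hp' : (x :: (t1 ++ y :: u)).Perm (x :: t) := by simpa using hp
      exact hp'.cons_inv
    · rename_i hxy
      have hay : a ≤ y := ha_le y (by simp)
      have hya : y ≤ a := by
        rcases (List.mem_append.mp (hp.symm.mem_iff.mp (List.mem_cons_self))) with h1 | h2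
        · rcases List.mem_cons.mp h1 with rfl | h1t
          · omega
          · exact le_trans (by omega) (List.rel_of_pairwise_cons hq1 h1t)
        · rcases List.mem_cons.mp h2 with rfl | h2u
          · exact le_refl _
          · exact List.rel_of_pairwise_cons hq2 h2u
      have hya' : y = a := le_antisymm hya hay
      subst hya'
      refine ⟨rfl, ?_, Or.inr ⟨rfl, rfl⟩⟩
      have hmid : ((x :: t1) ++ y :: u).Perm (y :: ((x :: t1) ++ u)) := List.perm_middle
      exact (hmid.symm.trans hp).cons_inv

theorem pvLoop_eq (n : ℕ) : ∀ (h q1 q2 : List Int) (K ans : Int),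
    h.length ≤ n → h ≠ [] →
    h.Pairwise (· ≤ ·) → q1.Pairwise (· ≤ ·) → q2.Pairwise (· ≤ ·) →
    h.Perm (q1 ++ q2) → pvBound q1 q2 →
    pvLoopA K h ans = pvLoopB K q1 q2 ans := by
  induction n with
  | zero =>
    intro h q1 q2 K ans hlen hne _ _ _ _ _
    cases h with
    | nil => exact absurd rfl hne
    | cons a t => simp at hlen
  | succ n ih =>
    intro h q1 q2 K ans hlen hne hs hq1 hq2 hperm hbound
    obtain ⟨a, t, rfl⟩ : ∃ a t, h = a :: t := by
      cases h with
      | nil => exact absurd rfl hne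
      | cons a t => exact ⟨a, t, rfl⟩
    have hp' : (q1 ++ q2).Perm (a :: t) := hperm.symm
    obtain ⟨hv, hrest, hdisj⟩ := pvPopMin_spec q1 q2 a t hq1 hq2 hp' hs
    have hlq : q1.length + q2.length = t.length + 1 := by
      have := hp'.length_eq; simpa using this
    rw [pvLoopA.eq_def, pvLoopB]
    dsimp only
    have hne0 : ¬ (q1.length + q2.length = 0) := by omega
    rw [dif_neg hne0, hv]
    by_cases hK : K ≤ a
    · simp [hK]
    · rw [if_neg hK, if_neg hK]
      cases t with
      | nil =>
        have h1 : q1.length + q2.length = 1 := by simp at hlq; omega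
        rw [dif_pos h1]
      | cons b t' =>
        have hne1 : ¬ (q1.length + q2.length = 1) := by simp at hlq; omega
        rw [dif_neg hne1]
        -- facts about the sorted heap a :: b :: t'
        have hs_tail : (b :: t').Pairwise (· ≤ ·) := hs.of_cons
        have ht'_sorted : t'.Pairwise (· ≤ ·) := hs_tail.of_cons
        have hab : a ≤ b := List.rel_of_pairwise_cons hs (by simp)
        have hbt' : ∀ z ∈ t', b ≤ z := fun z hz => List.rel_of_pairwise_cons hs_tail hz
        -- queues after the first pop
        have hr1 : (pvPopMin q1 q2).2.1.Pairwise (· ≤ ·) := by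
          rcases hdisj with ⟨hq, _⟩ | ⟨hr, _⟩
          · rw [hq] at hq1; exact hq1.of_cons
          · rw [hr]; exact hq1
        have hr2 : (pvPopMin q1 q2).2.2.Pairwise (· ≤ ·) := by
          rcases hdisj with ⟨_, hr⟩ | ⟨_, hq⟩
          · rw [hr]; exact hq2
          · rw [hq] at hq2; exact hq2.of_cons
        obtain ⟨hv2, hrest2, hdisj2⟩ :=
          pvPopMin_spec (pvPopMin q1 q2).2.1 (pvPopMin q1 q2).2.2 b t' hr1 hr2 hrest hs_tail
        rw [hv2]
        set r1 := (pvPopMin q1 q2).2.1 with hr1def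
        set r2 := (pvPopMin q1 q2).2.2 with hr2def
        set r1' := (pvPopMin r1 r2).2.1 with hr1'def
        set r2' := (pvPopMin r1 r2).2.2 with hr2'def
        -- queues after the second pop
        have hr1' : r1'.Pairwise (· ≤ ·) := by
          rcases hdisj2 with ⟨hq, _⟩ | ⟨hr, _⟩
          · rw [hq] at hr1; exact hr1.of_cons
          · rw [hr]; exact hr1
        have hr2' : r2'.Pairwise (· ≤ ·) := by
          rcases hdisj2 with ⟨_, hr⟩ | ⟨_, hq⟩
          · rw [hr]; exact hr2
          · rw [hq] at hr2; exact hr2.of_cons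
        -- membership transfers
        have hmem1 : ∀ x ∈ r1', x ∈ t' := fun x hx =>
          hrest2.mem_iff.mp (List.mem_append_left _ hx)
        have hmem2 : ∀ z ∈ r2', z ∈ t' := fun z hz =>
          hrest2.mem_iff.mp (List.mem_append_right _ hz)
        have hm_r2_r2' : ∀ z ∈ r2', z ∈ r2 := by
          intro z hz
          rcases hdisj2 with ⟨_, hr⟩ | ⟨_, hq⟩
          · rw [← hr]; exact hz
          · rw [hq]; exact List.mem_cons_of_mem _ hz
        have hm_r1_q1 : ∀ x ∈ r1', x ∈ q1 := by
          intro x hx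
          have hx1 : x ∈ r1 := by
            rcases hdisj2 with ⟨hq, _⟩ | ⟨hr, _⟩
            · rw [hq]; exact List.mem_cons_of_mem _ hx
            · rw [← hr]; exact hx
          rcases hdisj with ⟨hq, _⟩ | ⟨hr, _⟩
          · rw [hq]; exact List.mem_cons_of_mem _ hx1
          · rw [← hr]; exact hx1
        have hm_r2_q2 : ∀ z ∈ r2', z ∈ q2 := by
          intro z hz
          have hz1 : z ∈ r2 := hm_r2_r2' z hz
          rcases hdisj with ⟨_, hr⟩ | ⟨_, hq⟩
          · rw [← hr]; exact hz1
          · rw [hq]; exact List.mem_cons_of_mem _ hz1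
        obtain ⟨hb1, hb2⟩ := hbound
        -- produced value dominates the surviving produced queue
        have hzv : ∀ z ∈ r2', z ≤ a + 2 * b := by
          intro z hz
          rcases hdisj with ⟨hq, _⟩ | ⟨_, hq⟩
          · have := hb1 z (hm_r2_q2 z hz) a (by rw [hq]; simp)
            omega
          · have hz2 : z ∈ r2 := hm_r2_r2' z hz
            rw [hq] at hb2
            have := List.rel_of_pairwise_cons hb2 hz2
            omega
        -- invariants for the next iteration
        have hnew_s : (pvInsort (a + 2 * b) t').Pairwise (· ≤ ·) :=
          pvInsort_sorted _ _ ht'_sorted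
        have hnew_ne : pvInsort (a + 2 * b) t' ≠ [] := by
          have := pvInsort_length (a + 2 * b) t'
          intro hcon; rw [hcon] at this; simp at this
        have hnew_len : (pvInsort (a + 2 * b) t').length ≤ n := by
          rw [pvInsort_length]; simp at hlen; omega
        have hq2new : (r2' ++ [a + 2 * b]).Pairwise (· ≤ ·) := by
          rw [List.pairwise_append]
          refine ⟨hr2', by simp, ?_⟩
          intro z hz w hw
          rw [List.mem_singleton] at hw; subst hw
          exact hzv z hz
        have hperm_new : (pvInsort (a + 2 * b) t').Perm (r1' ++ (r2' ++ [a + 2 * b])) := by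
          have h1 := pvInsort_perm (a + 2 * b) t'
          have h2 : ((a + 2 * b) :: t').Perm ((a + 2 * b) :: (r1' ++ r2')) :=
            (hrest2.symm).cons _
          have h3 : ((a + 2 * b) :: (r1' ++ r2')).Perm ((r1' ++ r2') ++ [a + 2 * b]) :=
            (List.perm_append_singleton _ _).symm
          exact ((h1.trans h2).trans h3).trans (List.Perm.of_eq (List.append_assoc _ _ _))
        have hbound_new : pvBound r1' (r2' ++ [a + 2 * b]) := by
          constructor
          · intro z hz x hx
            rcases List.mem_append.mp hz with hz2 | hzl
            · exact hb1 z (hm_r2_q2 z hz2) x (hm_r1_q1 x hx)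
            · rw [List.mem_singleton] at hzl; subst hzl
              have := hbt' x (hmem1 x hx); omega
          · rw [List.pairwise_append]
            refine ⟨?_, by simp, ?_⟩
            · have hbr2 : r2.Pairwise (fun p z => z ≤ 3 * p) := by
                rcases hdisj with ⟨_, hr⟩ | ⟨_, hq⟩
                · rw [hr]; exact hb2
                · rw [hq] at hb2; exact hb2.of_cons
              rcases hdisj2 with ⟨_, hr⟩ | ⟨_, hq⟩
              · rw [hr]; exact hbr2
              · rw [hq] at hbr2; exact hbr2.of_cons
            · intro z hz w hw
              rw [List.mem_singleton] at hw; subst hw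
              have := hbt' z (hmem2 z hz); omega
        exact ih (pvInsort (a + 2 * b) t') r1' (r2' ++ [a + 2 * b]) K (ans + 1)
          hnew_len hnew_ne hnew_s hr1' hq2new hperm_new hbound_new

-- ===== VERDICT (by name: the statement is the Claim_ definition above) =====
theorem solution_spec : Claim_equal_solution := by
  intro scoville K _ hpre
  unfold Spec_solution solution solution_alt
  obtain ⟨hsort, hperm⟩ := pvBuild_sorted_perm scoville [] List.Pairwise.nil
  have hperm' : (scoville.foldl (fun h num => pvInsort num h) []).Perm scoville := by
    simpa using hperm
  have hq1s : (PySem.List.sorted scoville (fun x => x) false).Pairwise (· ≤ ·) :=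
    PySem.List.sorted_pairwise scoville (fun x => x)
  have hq1p : (PySem.List.sorted scoville (fun x => x) false).Perm scoville :=
    PySem.List.sorted_perm scoville (fun x => x) false
  have hne : scoville.foldl (fun h num => pvInsort num h) [] ≠ [] := by
    intro hc
    rw [hc] at hperm'
    exact hpre (hperm'.symm.eq_nil)
  refine pvLoop_eq (scoville.foldl (fun h num => pvInsort num h) []).length _ _ _ K 0
    le_rfl hne hsort hq1s List.Pairwise.nil ?_ ⟨by simp, List.Pairwise.nil⟩
  simpa using hperm'.trans hq1p.symm
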